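-- pv_equiv track=rewrite | github.com/justinmeredith/Arecibo | Arecibo.py | clueGenerator
-- ===== SOURCE A (Python) =====
-- def clueGenerator(solve_attempt, secret_message, message_length):
--     # Array that will store and return the clues
--     generated_clues = []
--
--     for i in range(message_length):
--         if solve_attempt[i] == secret_message[i]:
--             generated_clues.append('Alpha')
--         elif solve_attempt[i] in secret_message:
--             generated_clues.append('Omega')
--         else:
--             generated_clues.append('Void')
--     generated_clues.sort()
--     return ' '.join(generated_clues)
-- ===== SOURCE B (Python) =====
-- def clueGenerator(solve_attempt, secret_message, message_length):
--     alpha = omega = void = 0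
--     for i in range(message_length):
--         if solve_attempt[i] == secret_message[i]:
--             alpha += 1
--         elif solve_attempt[i] in secret_message:
--             omega += 1
--         else:
--             void += 1
--     return ' '.join(['Alpha'] * alpha + ['Omega'] * omega + ['Void'] * void)
-- ===== Notes on version B (the rewrite author's own statement) =====
-- stated objective: alternative
-- what changed: B keeps three integer counters instead of building a list of clue words, and emits the result directly as concatenated 'Alpha'/'Omega'/'Void' blocks (lexicographically ordered by construction), so the list of clues and the general sort disappear.
import Mathlib
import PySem

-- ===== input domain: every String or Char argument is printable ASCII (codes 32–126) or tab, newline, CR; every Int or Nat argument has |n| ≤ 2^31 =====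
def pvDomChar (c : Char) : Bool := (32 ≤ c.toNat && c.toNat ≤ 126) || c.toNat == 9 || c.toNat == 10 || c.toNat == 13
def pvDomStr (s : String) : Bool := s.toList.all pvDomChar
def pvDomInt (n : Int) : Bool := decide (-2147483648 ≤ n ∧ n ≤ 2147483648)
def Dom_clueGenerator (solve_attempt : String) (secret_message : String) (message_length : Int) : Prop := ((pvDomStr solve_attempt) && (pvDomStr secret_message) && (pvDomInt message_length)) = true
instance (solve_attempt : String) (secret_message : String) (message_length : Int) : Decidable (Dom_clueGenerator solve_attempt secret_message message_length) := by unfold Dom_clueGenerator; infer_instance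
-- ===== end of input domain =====

-- B replaces A's clue list + sort by three counters and direct Alpha/Omega/Void block construction (alternative decomposition; return value only).


-- ===== PORT A =====
-- for i in range(message_length): append 'Alpha'/'Omega'/'Void'; then .sort(); then ' '.join.
-- solve_attempt[i] is a 1-char string; `c in secret_message` is ported as PySem.Chars.isIn [c] (the substring test: exact).
-- Indexing uses pyGetD, legitimate under Pre_ (message_length within both lengths).
def clueGenerator (solve_attempt : String) (secret_message : String) (message_length : Int) : String :=
  let generated_clues : List String :=
    (PySem.List.pyRange 0 message_length 1).foldl
      (fun acc i =>
        if PySem.List.pyGetD solve_attempt.toList i ' ' = PySem.List.pyGetD secret_message.toList i ' ' then acc ++ ["Alpha"]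
        else if PySem.Chars.isIn [PySem.List.pyGetD solve_attempt.toList i ' '] secret_message.toList then acc ++ ["Omega"]
        else acc ++ ["Void"])
      []
  PySem.Str.join " " (PySem.List.sorted generated_clues (fun x => x) false)

-- ===== PORT B =====
-- three counters in one pass; the result is built directly as Alpha/Omega/Void blocks (no clue list, no sort)
def clueGenerator_alt (solve_attempt : String) (secret_message : String) (message_length : Int) : String :=
  let c : Nat × Nat × Nat :=
    (PySem.List.pyRange 0 message_length 1).foldl
      (fun t i =>
        if PySem.List.pyGetD solve_attempt.toList i ' ' = PySem.List.pyGetD secret_message.toList i ' ' then (t.1 + 1, t.2.1, t.2.2)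
        else if PySem.Chars.isIn [PySem.List.pyGetD solve_attempt.toList i ' '] secret_message.toList then (t.1, t.2.1 + 1, t.2.2)
        else (t.1, t.2.1, t.2.2 + 1))
      (0, 0, 0)
  PySem.Str.join " "
    (List.replicate c.1 "Alpha" ++ List.replicate c.2.1 "Omega" ++ List.replicate c.2.2 "Void")

-- ===== PRECONDITION & SPEC =====
-- Pre_ excludes exactly the inputs where A raises IndexError: message_length exceeding either string's length (B raises there too).
def Pre_clueGenerator (solve_attempt : String) (secret_message : String) (message_length : Int) : Prop :=
  message_length ≤ (solve_attempt.toList.length : Int) ∧ message_length ≤ (secret_message.toList.length : Int)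
instance (solve_attempt : String) (secret_message : String) (message_length : Int) : Decidable (Pre_clueGenerator solve_attempt secret_message message_length) := by unfold Pre_clueGenerator; infer_instance

def pvWitness_clueGenerator : String × String × Int := ("ab", "ba", 2)

def Spec_clueGenerator (solve_attempt : String) (secret_message : String) (message_length : Int) (out : String) : Prop := out = clueGenerator_alt solve_attempt secret_message message_length
instance (solve_attempt : String) (secret_message : String) (message_length : Int) (out : String) : Decidable (Spec_clueGenerator solve_attempt secret_message message_length out) := by unfold Spec_clueGenerator; infer_instance

-- ===== CLAIM (what is proved, stated in full; the proofs are below) =====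
def Claim_equal_clueGenerator : Prop := ∀ (solve_attempt : String) (secret_message : String) (message_length : Int), Dom_clueGenerator solve_attempt secret_message message_length → Pre_clueGenerator solve_attempt secret_message message_length → Spec_clueGenerator solve_attempt secret_message message_length (clueGenerator solve_attempt secret_message message_length)

-- ===== LEMMAS AND PROOFS =====

-- A's loop is a map over the index list
lemma afold_eq_map (l : List Int) (p q : Int → Prop) [DecidablePred p] [DecidablePred q] :
    l.foldl (fun acc i =>
        if p i then acc ++ ["Alpha"] else if q i then acc ++ ["Omega"] else acc ++ ["Void"]) []
      = l.map (fun i => if p i then "Alpha" else if q i then "Omega" else "Void") := by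
  have hstep : (fun (acc : List String) i =>
      if p i then acc ++ ["Alpha"] else if q i then acc ++ ["Omega"] else acc ++ ["Void"])
      = fun acc i => acc ++ [if p i then "Alpha" else if q i then "Omega" else "Void"] := by
    funext acc i; split_ifs <;> rfl
  rw [hstep]
  simpa using PySem.List.foldl_append_singleton_eq_map
    (fun i => if p i then "Alpha" else if q i then "Omega" else "Void") l []

-- B's loop computes the three label counts of that map
lemma bfold_eq_counts (l : List Int) (p q : Int → Prop) [DecidablePred p] [DecidablePred q]
    (a o v : Nat) :
    l.foldl (fun (t : Nat × Nat × Nat) i =>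
        if p i then (t.1 + 1, t.2.1, t.2.2)
        else if q i then (t.1, t.2.1 + 1, t.2.2)
        else (t.1, t.2.1, t.2.2 + 1)) (a, o, v)
      = (a + (l.map (fun i => if p i then "Alpha" else if q i then "Omega" else "Void")).count "Alpha",
         o + (l.map (fun i => if p i then "Alpha" else if q i then "Omega" else "Void")).count "Omega",
         v + (l.map (fun i => if p i then "Alpha" else if q i then "Omega" else "Void")).count "Void") := by
  induction l generalizing a o v with
  | nil => simp
  | cons x xs ih =>
    simp only [List.foldl_cons, List.map_cons]
    split_ifs with h1 h2 <;> simp [ih] <;> omega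

-- any list over the three labels is a permutation of its Alpha/Omega/Void blocks
lemma perm_blocks (L : List String) (h : ∀ x ∈ L, x = "Alpha" ∨ x = "Omega" ∨ x = "Void") :
    (List.replicate (L.count "Alpha") "Alpha" ++ List.replicate (L.count "Omega") "Omega"
      ++ List.replicate (L.count "Void") "Void").Perm L := by
  induction L with
  | nil => simp
  | cons x xs ih =>
    have ih' := ih (fun y hy => h y (by simp [hy]))
    rcases h x (by simp) with rfl | rfl | rfl
    · simp only [List.count_cons_self, List.count_cons, List.replicate_succ]
      simp
      simpa using ih'.cons "Alpha"
    · simp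
      rw [List.replicate_succ]
      have mid : (List.replicate (xs.count "Alpha") "Alpha" ++ ("Omega" :: List.replicate (xs.count "Omega") "Omega") ++ List.replicate (xs.count "Void") "Void").Perm
          ("Omega" :: (List.replicate (xs.count "Alpha") "Alpha" ++ List.replicate (xs.count "Omega") "Omega" ++ List.replicate (xs.count "Void") "Void")) := by
        simpa [List.append_assoc] using
          (List.perm_middle (a := ("Omega" : String))
            (l₁ := List.replicate (xs.count "Alpha") "Alpha")
            (l₂ := List.replicate (xs.count "Omega") "Omega" ++ List.replicate (xs.count "Void") "Void"))
      refine List.Perm.trans ?_ (ih'.cons "Omega")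
      simpa [List.append_assoc] using mid
    · simp
      rw [List.replicate_succ]
      have mid : (List.replicate (xs.count "Alpha") "Alpha" ++ List.replicate (xs.count "Omega") "Omega" ++ ("Void" :: List.replicate (xs.count "Void") "Void")).Perm
          ("Void" :: (List.replicate (xs.count "Alpha") "Alpha" ++ List.replicate (xs.count "Omega") "Omega" ++ List.replicate (xs.count "Void") "Void")) := by
        simpa [List.append_assoc] using
          (List.perm_middle (a := ("Void" : String))
            (l₁ := List.replicate (xs.count "Alpha") "Alpha" ++ List.replicate (xs.count "Omega") "Omega")
            (l₂ := List.replicate (xs.count "Void") "Void"))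
      refine List.Perm.trans ?_ (ih'.cons "Void")
      simpa [List.append_assoc] using mid

-- the three blocks are already in nondecreasing order
lemma blocks_pairwise (a o v : Nat) :
    (List.replicate a ("Alpha" : String) ++ List.replicate o "Omega" ++ List.replicate v "Void").Pairwise (· ≤ ·) := by
  have hAO : ("Alpha" : String) ≤ "Omega" := by simp [String.le_iff_toList_le]; decide
  have hAV : ("Alpha" : String) ≤ "Void" := by simp [String.le_iff_toList_le]; decide
  have hOV : ("Omega" : String) ≤ "Void" := by simp [String.le_iff_toList_le]; decide
  simp only [List.pairwise_append]
  refine ⟨⟨List.pairwise_replicate_of_refl, List.pairwise_replicate_of_refl, ?_⟩,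
    List.pairwise_replicate_of_refl, ?_⟩
  · intro x hx y hy
    rw [List.eq_of_mem_replicate hx, List.eq_of_mem_replicate hy]; exact hAO
  · intro x hx y hy
    rcases List.mem_append.mp hx with hx | hx <;>
      rw [List.eq_of_mem_replicate hx, List.eq_of_mem_replicate hy]
    · exact hAV
    · exact hOV

-- the sort of a list over the three labels IS its block decomposition
lemma sorted_three (L : List String) (h : ∀ x ∈ L, x = "Alpha" ∨ x = "Omega" ∨ x = "Void") :
    PySem.List.sorted L (fun x => x) false
      = List.replicate (L.count "Alpha") "Alpha" ++ List.replicate (L.count "Omega") "Omega"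
        ++ List.replicate (L.count "Void") "Void" :=
  PySem.List.sorted_id_eq_of_perm_of_pairwise _ _ (perm_blocks L h) (blocks_pairwise _ _ _)

-- ===== VERDICT (by name: the statement is the Claim_ definition above) =====
theorem clueGenerator_spec : Claim_equal_clueGenerator := by
  intro sa sm ml _ _
  unfold Spec_clueGenerator clueGenerator clueGenerator_alt
  simp only
  rw [afold_eq_map (PySem.List.pyRange 0 ml 1)
        (fun i => PySem.List.pyGetD sa.toList i ' ' = PySem.List.pyGetD sm.toList i ' ')
        (fun i => PySem.Chars.isIn [PySem.List.pyGetD sa.toList i ' '] sm.toList = true),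
      bfold_eq_counts (PySem.List.pyRange 0 ml 1)
        (fun i => PySem.List.pyGetD sa.toList i ' ' = PySem.List.pyGetD sm.toList i ' ')
        (fun i => PySem.Chars.isIn [PySem.List.pyGetD sa.toList i ' '] sm.toList = true) 0 0 0,
      sorted_three]
  · simp
  · intro x hx
    rcases List.mem_map.mp hx with ⟨i, _, rfl⟩
    by_cases h1 : PySem.List.pyGetD sa.toList i ' ' = PySem.List.pyGetD sm.toList i ' '
    · simp [h1]
    · by_cases h2 : PySem.Chars.isIn [PySem.List.pyGetD sa.toList i ' '] sm.toList = true <;> simp [h1, h2]
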